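-- pv_equiv track=rewrite | github.com/jkusner/LuaObfuscator | obfuscator.py | rearrange_functions
-- ===== SOURCE A (Python) =====
-- def rearrange_functions(tokens, start_index=0):
--     """
--     First checks for meta functions
--     "function _PlayerMeta:Derp(...)" -> "function _PlayerMeta.Derp(self, ...)"
--
--     Then, moves function declarations around
--     "function f()"       -> "f = function()"
--     "local function f()" -> "local f = function()"
--     """
--     for i in range(start_index, len(tokens)):
--         t = tokens[i]
--         # Look for function declaration without '(' after
--         # EX:  function f()
--         if t == "function":
--             if tokens[i+1] != "(":
--                 # Find the function declaration opening '('
--                 p = index(tokens, "(", i)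
--
--                 # Fix meta function if it is a meta function
--                 c = index(tokens, ":", i)
--                 if i < c < p:
--                     # Colon was found, make it a . and fix function args
--                     tokens[c] = "."
--                     tokens.insert(p + 1, "self")
--                     if tokens[p+2] != ")":
--                         # If the function has arguments, add a comma here
--                         # otherwise, we are done
--                         # "(self a, b, c)" -> "(self, a, b, c)"
--                         tokens.insert(p + 2, ",")
--
--                 # Insert the new function declaration
--                 tokens.insert(p, "function")
--                 tokens.insert(p, "=")
--
--                 # Delete the old declaration
--                 del tokens[i]
--                 return rearrange_functions(tokens, i)
--     return tokens
--
-- def index(tokens, item, start_index=0):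
--     """
--     Returns the index of a token in a list, or -1
--     """
--     try:
--         i = tokens.index(item, start_index)
--         return i
--     except:
--         return -1
-- ===== SOURCE B (Python) =====
-- def rearrange_functions(tokens, start_index=0):
--     """Single forward pass building a new token list; the colon search is
--     bounded to the declaration head (between 'function' and its '(')."""
--     n = len(tokens)
--     out = list(tokens[:start_index])
--     i = start_index
--     while i < n:
--         t = tokens[i]
--         if t == "function" and i + 1 < n and tokens[i + 1] != "(":
--             p = tokens.index("(", i + 1)
--             head = tokens[i + 1:p]
--             if ":" in head:
--                 head[head.index(":")] = "."
--                 out += head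
--                 out += ["=", "function", "(", "self"]
--                 if tokens[p + 1] != ")":
--                     out.append(",")
--             else:
--                 out += head
--                 out += ["=", "function", "("]
--             i = p + 1
--         else:
--             out.append(t)
--             i += 1
--     return out
-- ===== Notes on version B (the rewrite author's own statement) =====
-- stated objective: alternative
-- what changed: A repeatedly mutates the token list in place (insert/delete per rewritten declaration) and recursively restarts its scan after every rewrite, searching for ':' anywhere to the right; B makes one forward pass that copies tokens into a fresh output list, rewriting each declaration head as it is reached, with the colon test bounded to the head between 'function' and its '('.
-- outside the precondition, e.g. on rearrange_functions(['x', 'y'], -1): A returns ['x', 'y'], B returns ['x', 'y', 'x', 'y']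
import Mathlib
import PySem

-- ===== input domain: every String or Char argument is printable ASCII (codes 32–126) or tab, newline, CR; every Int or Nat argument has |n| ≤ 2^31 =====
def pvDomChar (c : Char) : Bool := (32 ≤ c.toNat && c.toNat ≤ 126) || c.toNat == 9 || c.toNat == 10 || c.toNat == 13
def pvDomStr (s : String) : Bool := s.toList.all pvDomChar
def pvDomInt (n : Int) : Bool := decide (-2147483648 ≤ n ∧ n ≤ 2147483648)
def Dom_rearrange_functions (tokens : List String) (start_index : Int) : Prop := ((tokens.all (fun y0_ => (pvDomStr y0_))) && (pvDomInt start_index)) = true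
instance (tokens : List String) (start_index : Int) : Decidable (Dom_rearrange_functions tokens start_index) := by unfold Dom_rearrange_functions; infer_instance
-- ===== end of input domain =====

-- B rebuilds the token list in one forward pass instead of A's mutate-and-recurse;
-- equivalence is about the RETURN value only (A also mutates its `tokens` argument in place, B does not).

-- ===== PORT A =====
-- A's helper `index(tokens, item, start_index)`: Python list.index with a start, -1 when absent.
def pvIndexHelper (tokens : List String) (item : String) (start_index : Int) : Int :=
  let st : Nat := (if start_index < 0 then max 0 ((tokens.length : Int) + start_index) else start_index).toNat
  match PySem.List.index? (tokens.drop st) item with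
  | some k => (st : Int) + (k : Int)
  | none => -1

-- The `for i in range(start_index, len(tokens))` loop (g counts the remaining iterations) plus the
-- tail-recursive `return rearrange_functions(tokens, i)`; f is fuel for that self-call (Python has
-- none and recurses forever / overflows outside Pre_; f is only a totality device).
def pvRearrScan : Nat → Nat → List String → Int → List String
  | _, 0, toks, _ => toks
  | f, g+1, toks, i =>
    let t := PySem.List.pyGetD toks i ""
    if t = "function" ∧ PySem.List.pyGetD toks (i+1) "" ≠ "(" then
      let p := pvIndexHelper toks "(" i
      let c := pvIndexHelper toks ":" i
      let toks1 :=
        if i < c ∧ c < p then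
          let a := PySem.List.pySetD toks c "."
          let b := PySem.List.insert a (p+1) "self"
          if PySem.List.pyGetD b (p+2) "" ≠ ")" then PySem.List.insert b (p+2) "," else b
        else toks
      let toks2 := PySem.List.insert (PySem.List.insert toks1 p "function") p "="
      let toks3 := ((PySem.List.pop? toks2 i).map Prod.snd).getD toks2
      match f with
      | 0 => toks3
      | f'+1 => pvRearrScan f' (((toks3.length : Int) - i).toNat) toks3 i
    else pvRearrScan f g toks (i+1)

def rearrange_functions (tokens : List String) (start_index : Int) : List String :=
  pvRearrScan tokens.length (((tokens.length : Int) - start_index).toNat) tokens start_index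

-- ===== PORT B =====
-- B's `while i < n` loop: one forward pass, copying tokens into `out` and rewriting each
-- declaration head when it is found; g counts remaining iterations (i strictly increases).
def pvAltLoop (tokens : List String) (n : Nat) : Nat → Int → List String → List String
  | 0, _, out => out
  | g+1, i, out =>
    if i < (n : Int) then
      let t := PySem.List.pyGetD tokens i ""
      if t = "function" ∧ i + 1 < (n : Int) ∧ PySem.List.pyGetD tokens (i+1) "" ≠ "(" then
        match PySem.List.index? (tokens.drop (i+1).toNat) "(" with
        | none => out      -- Python: tokens.index raises ValueError here (outside Pre_)
        | some k =>
          let p : Int := i + 1 + (k : Int)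
          let head := PySem.List.slice tokens (some (i+1)) (some p)
          if ":" ∈ head then
            let head2 := PySem.List.pySetD head (((PySem.List.index? head ":").getD 0 : Nat) : Int) "."
            let out2 := out ++ head2 ++ ["=", "function", "(", "self"]
            let out3 := if PySem.List.pyGetD tokens (p+1) "" ≠ ")" then out2 ++ [","] else out2
            pvAltLoop tokens n g (p+1) out3
          else
            pvAltLoop tokens n g (p+1) (out ++ head ++ ["=", "function", "("])
      else pvAltLoop tokens n g (i+1) (out ++ [t])
    else out

def rearrange_functions_alt (tokens : List String) (start_index : Int) : List String :=
  pvAltLoop tokens tokens.length (((tokens.length : Int) - start_index).toNat) start_index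
    (PySem.List.slice tokens none (some start_index))

-- ===== PRECONDITION & SPEC =====
-- What must hold for the tokens after each 'function' occurrence: either an immediate '(' (anonymous
-- function), or a declaration head with no nested 'function' up to the first '(', and, when the head
-- contains a ':' (meta-method), at least one token after that '('.
abbrev pvHeadOK (u : List String) : Prop :=
  u ≠ [] ∧ (u.getD 0 "" = "(" ∨
    ("(" ∈ u ∧ "function" ∉ u.take (u.idxOf "(") ∧
      (":" ∈ u.take (u.idxOf "(") → u.idxOf "(" + 1 < u.length)))

-- Pre_ restricts to the function's natural domain: a non-negative start cursor (a negative one makes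
-- Python scan via negative-index wraparound) and a scanned region whose 'function' tokens are each
-- followed by a well-formed declaration; outside it A raises IndexError / ValueError-free infinite
-- recursion (RecursionError) or returns accidental wraparound values.
def Pre_rearrange_functions (tokens : List String) (start_index : Int) : Prop :=
  0 ≤ start_index ∧
  ∀ k, k < (tokens.drop start_index.toNat).length →
    (tokens.drop start_index.toNat).getD k "" = "function" →
    pvHeadOK ((tokens.drop start_index.toNat).drop (k+1))

instance (tokens : List String) (start_index : Int) : Decidable (Pre_rearrange_functions tokens start_index) := by
  unfold Pre_rearrange_functions; infer_instance

def pvWitness_rearrange_functions : List String × Int :=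
  (["function", "M", ":", "D", "(", "a", ")", "function", "f", "(", ")"], 0)

def Spec_rearrange_functions (tokens : List String) (start_index : Int) (out : List String) : Prop := out = rearrange_functions_alt tokens start_index
instance (tokens : List String) (start_index : Int) (out : List String) : Decidable (Spec_rearrange_functions tokens start_index out) := by unfold Spec_rearrange_functions; infer_instance

-- ===== CLAIM (what is proved, stated in full; the proofs are below) =====
def Claim_equal_rearrange_functions : Prop := ∀ (tokens : List String) (start_index : Int), Dom_rearrange_functions tokens start_index → Pre_rearrange_functions tokens start_index → Spec_rearrange_functions tokens start_index (rearrange_functions tokens start_index)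

-- ===== LEMMAS AND PROOFS =====

-- ---- proof-only abstractions ----

-- first ':' in a declaration head becomes '.'
def pvFixColon (seg : List String) : List String :=
  match PySem.List.index? seg ":" with
  | some k => seg.set k "."
  | none => seg

-- tokens inserted after the '(' of a meta-method
def pvExtras (seg tail : List String) : List String :=
  if ":" ∈ seg then "self" :: (if tail.getD 0 "" ≠ ")" then [","] else []) else []

-- number of rewritable 'function' occurrences
def pvCnt : List String → Nat
  | [] => 0
  | t :: rest => (if t = "function" ∧ rest.getD 0 "" ≠ "(" then 1 else 0) + pvCnt rest

-- the common value both programs compute on a suffix of the token list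
def pvSpec : List String → List String
  | [] => []
  | t :: rest =>
    if t = "function" ∧ rest.getD 0 "" ≠ "(" ∧ "(" ∈ rest then
      pvFixColon (rest.take (rest.idxOf "(")) ++ ["=", "function", "("] ++
        pvExtras (rest.take (rest.idxOf "(")) (rest.drop (rest.idxOf "(" + 1)) ++
        pvSpec (rest.drop (rest.idxOf "(" + 1))
    else t :: pvSpec rest
termination_by l => l.length
decreasing_by
  · simp only [List.length_drop, List.length_cons]; omega
  · simp only [List.length_cons]; omega

-- every 'function' suffix of l has a well-formed head
def pvEF (l : List String) : Prop := ∀ u, ("function" :: u) <:+ l → pvHeadOK u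

lemma pvEF_suffix {l l' : List String} (h : l' <:+ l) (he : pvEF l) : pvEF l' :=
  fun u hu => he u (hu.trans h)

lemma pvEF_of_forall {l : List String}
    (h : ∀ k, k < l.length → l.getD k "" = "function" → pvHeadOK (l.drop (k+1))) :
    pvEF l := by
  intro u hu
  obtain ⟨pre, hp⟩ := hu
  have hk : pre.length < l.length := by subst hp; simp
  have h1 : l.getD pre.length "" = "function" := by
    subst hp
    simp [List.getD_eq_getElem?_getD]
  have h2 : l.drop (pre.length + 1) = u := by
    subst hp; rw [List.drop_append]; simp
  have := h pre.length hk h1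
  rwa [h2] at this

lemma pvEF_cons_of_ne {t : String} {l : List String} (ht : t ≠ "function") (h : pvEF l) :
    pvEF (t :: l) := by
  intro u hu
  rcases List.suffix_cons_iff.mp hu with h1 | h2
  · injection h1 with hh _
    exact absurd hh.symm ht
  · exact h u h2

lemma pvEF_append_no_fun {xs l : List String} (hx : "function" ∉ xs) (h : pvEF l) :
    pvEF (xs ++ l) := by
  induction xs with
  | nil => exact h
  | cons a xs ih =>
    have : a ≠ "function" := fun hh => hx (hh ▸ List.mem_cons_self)
    exact pvEF_cons_of_ne this (ih (fun hm => hx (List.mem_cons_of_mem a hm)))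

lemma pvEF_fun_paren {l : List String} (h : pvEF l) : pvEF ("function" :: "(" :: l) := by
  intro u hu
  rcases List.suffix_cons_iff.mp hu with h1 | h2
  · obtain rfl : u = "(" :: l := by injection h1
    exact ⟨List.cons_ne_nil _ _, Or.inl rfl⟩
  · rcases List.suffix_cons_iff.mp h2 with h3 | h4
    · injection h3 with hh _
      exact absurd hh (by decide)
    · exact h u h4

theorem pv_witness_ok :
    Dom_rearrange_functions pvWitness_rearrange_functions.1 pvWitness_rearrange_functions.2 ∧
    Pre_rearrange_functions pvWitness_rearrange_functions.1 pvWitness_rearrange_functions.2 := by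
  constructor <;> decide

-- ---- counting rewritable occurrences ----

lemma pvCnt_le_length (l : List String) : pvCnt l ≤ l.length := by
  induction l with
  | nil => simp [pvCnt]
  | cons t rest ih => simp only [pvCnt, List.length_cons]; split <;> omega

lemma pvCnt_cons_of_ne {t : String} {l : List String} (ht : t ≠ "function") :
    pvCnt (t :: l) = pvCnt l := by
  simp [pvCnt, ht]

lemma pvCnt_append_no_fun {xs l : List String} (hx : "function" ∉ xs) :
    pvCnt (xs ++ l) = pvCnt l := by
  induction xs with
  | nil => rfl
  | cons a xs ih =>
    have ha : a ≠ "function" := fun hh => hx (hh ▸ List.mem_cons_self)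
    rw [List.cons_append, pvCnt_cons_of_ne ha, ih (fun hm => hx (List.mem_cons_of_mem a hm))]

lemma pvCnt_hit {seg tail : List String} (hs : seg ≠ []) (h1 : "(" ∉ seg)
    (h2 : "function" ∉ seg) :
    pvCnt ("function" :: (seg ++ "(" :: tail)) = 1 + pvCnt tail := by
  obtain ⟨s0, seg', rfl⟩ := List.exists_cons_of_ne_nil hs
  have hs0 : s0 ≠ "(" := fun hh => h1 (hh ▸ List.mem_cons_self)
  have : pvCnt ("function" :: (s0 :: seg' ++ "(" :: tail)) =
      1 + pvCnt (s0 :: seg' ++ "(" :: tail) := by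
    simp [pvCnt, hs0, List.getD_eq_getElem?_getD]
  rw [this, pvCnt_append_no_fun h2, pvCnt_cons_of_ne (by decide)]

-- ---- pvSpec unfolding lemmas ----

lemma pvSpec_nil : pvSpec [] = [] := by rw [pvSpec]

lemma pvSpec_cons_of_ne {t : String} {l : List String} (ht : t ≠ "function") :
    pvSpec (t :: l) = t :: pvSpec l := by
  rw [pvSpec]; simp [ht]

lemma pvSpec_append_no_fun {xs l : List String} (hx : "function" ∉ xs) :
    pvSpec (xs ++ l) = xs ++ pvSpec l := by
  induction xs with
  | nil => rfl
  | cons a xs ih =>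
    have ha : a ≠ "function" := fun hh => hx (hh ▸ List.mem_cons_self)
    rw [List.cons_append, pvSpec_cons_of_ne ha, ih (fun hm => hx (List.mem_cons_of_mem a hm))]
    simp

lemma pvSpec_fun_paren (l : List String) :
    pvSpec ("function" :: "(" :: l) = "function" :: "(" :: pvSpec l := by
  rw [pvSpec]
  simp only [List.getD_eq_getElem?_getD, List.getElem?_cons_zero, Option.getD_some]
  rw [if_neg (by simp), pvSpec_cons_of_ne (by decide)]

lemma pvIdxOf_append_self {seg tail : List String} {v : String} (h : v ∉ seg) :
    (seg ++ v :: tail).idxOf v = seg.length := by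
  induction seg with
  | nil => simp
  | cons a seg ih =>
    have ha : v ≠ a := fun hh => h (hh ▸ List.mem_cons_self)
    rw [List.cons_append, List.idxOf_cons_ne _ (by exact fun hh => ha hh.symm),
      ih (fun hm => h (List.mem_cons_of_mem a hm))]
    simp

lemma pvSpec_hit {seg tail : List String} (hs : seg ≠ []) (h1 : "(" ∉ seg)
    (h2 : "function" ∉ seg) :
    pvSpec ("function" :: (seg ++ "(" :: tail)) =
      pvFixColon seg ++ ["=", "function", "("] ++ pvExtras seg tail ++ pvSpec tail := by
  obtain ⟨s0, seg', hseg⟩ := List.exists_cons_of_ne_nil hs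
  have hs0 : s0 ≠ "(" := fun hh => h1 (hh ▸ hseg ▸ List.mem_cons_self)
  have hget : (seg ++ "(" :: tail).getD 0 "" = s0 := by
    subst hseg; simp [List.getD_eq_getElem?_getD]
  have hidx : (seg ++ "(" :: tail).idxOf "(" = seg.length := pvIdxOf_append_self h1
  rw [pvSpec]
  rw [if_pos ⟨rfl, by rw [hget]; exact hs0, by simp⟩]
  rw [hidx, List.take_left, List.drop_append]
  have : seg.length + 1 - seg.length = 1 := by omega
  rw [List.drop_of_length_le (by omega), this]
  simp

-- ---- decomposing a hit ----

lemma pvNotMem_take_idxOf (v : String) (u : List String) : v ∉ u.take (u.idxOf v) := by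
  induction u with
  | nil => simp
  | cons a u ih =>
    by_cases h : a = v
    · subst h; simp
    · rw [List.idxOf_cons_ne _ h, Nat.succ_eq_add_one, List.take_succ_cons]
      intro hm
      rcases List.mem_cons.mp hm with h1 | h2
      · exact h h1.symm
      · exact ih h2

lemma pvCnt_fun_paren (l : List String) : pvCnt ("function" :: "(" :: l) = pvCnt l := by
  simp [pvCnt, List.getD_eq_getElem?_getD]

lemma pvIndex?_append_not_mem {xs l : List String} {v : String} (h : v ∉ xs) :
    PySem.List.index? (xs ++ l) v = (PySem.List.index? l v).map (fun m => xs.length + m) := by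
  induction xs with
  | nil => simp [Option.map_id']
  | cons a xs ih =>
    have ha : a ≠ v := fun hh => h (hh ▸ List.mem_cons_self)
    rw [List.cons_append, PySem.List.index?_cons_of_ne _ ha,
      ih (fun hm => h (List.mem_cons_of_mem a hm))]
    cases PySem.List.index? l v <;> (simp; try omega)

lemma pvHit_decomp {u : List String} (hok : pvHeadOK u) (hne : u.getD 0 "" ≠ "(") :
    ∃ seg tail, u = seg ++ "(" :: tail ∧ seg ≠ [] ∧ "(" ∉ seg ∧ "function" ∉ seg ∧
      (":" ∈ seg → tail ≠ []) ∧ PySem.List.index? u "(" = some seg.length := by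
  obtain ⟨hnil, hcase⟩ := hok
  rcases hcase with hl | ⟨hmem, hnf, hcolon⟩
  · exact absurd hl hne
  have hk : u.idxOf "(" < u.length := List.idxOf_lt_length_of_mem hmem
  have hu : u = u.take (u.idxOf "(") ++ "(" :: u.drop (u.idxOf "(" + 1) := by
    conv_lhs => rw [← List.take_append_drop (u.idxOf "(") u]
    rw [List.drop_eq_getElem_cons hk, List.getElem_idxOf hk]
  have hnm : "(" ∉ u.take (u.idxOf "(") := pvNotMem_take_idxOf _ _
  refine ⟨u.take (u.idxOf "("), u.drop (u.idxOf "(" + 1), hu, ?_, hnm, hnf, ?_, ?_⟩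
  · intro hemp
    have h0 : u.idxOf "(" = 0 ∨ u = [] := by
      rcases List.take_eq_nil_iff.mp hemp with h | h
      · exact Or.inl h
      · exact Or.inr h
    rcases h0 with h | h
    · apply hne
      rw [List.getD_eq_getElem?_getD, List.getElem?_eq_getElem (h ▸ hk)]
      simpa [h] using congrArg (fun z => z) (List.getElem_idxOf (h ▸ hk) : u[u.idxOf "("] = "(")
    · subst h; simp at hmem
  · intro hc
    have := hcolon hc
    intro hd
    rw [List.drop_eq_nil_iff] at hd
    omega
  · rw [PySem.List.index?_eq_some_iff]
    exact ⟨_, _, hu, rfl, hnm⟩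

-- the first ':' in seg, when present, via a decomposition
lemma pvFixColon_decomp {seg s1 s2 : List String} (hseg : seg = s1 ++ ":" :: s2)
    (hkc : PySem.List.index? seg ":" = some s1.length) :
    pvFixColon seg = s1 ++ "." :: s2 := by
  subst hseg
  unfold pvFixColon
  rw [hkc]
  show (s1 ++ ":" :: s2).set s1.length "." = s1 ++ "." :: s2
  rw [List.set_append, if_neg (by omega)]
  simp

lemma pvLength_fixColon (seg : List String) : (pvFixColon seg).length = seg.length := by
  unfold pvFixColon
  cases PySem.List.index? seg ":" <;> simp

lemma pvNoFun_fixColon {seg : List String} (h : "function" ∉ seg) :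
    "function" ∉ pvFixColon seg := by
  unfold pvFixColon
  cases PySem.List.index? seg ":" with
  | none => exact h
  | some k =>
    intro hm
    rcases List.mem_or_eq_of_mem_set hm with h1 | h2
    · exact h h1
    · simp at h2

lemma pvNoFun_extras (seg tail : List String) : "function" ∉ pvExtras seg tail := by
  unfold pvExtras
  split_ifs <;> simp

lemma pvIndexHelper_eq {toks : List String} (item : String) (i : Nat) :
    pvIndexHelper toks item ↑i =
      match PySem.List.index? (toks.drop i) item with
      | some k => ((i + k : Nat) : Int)
      | none => -1 := by
  unfold pvIndexHelper
  rw [if_neg (by omega), Int.toNat_natCast, PySem.List.index?_eq_idxOf?]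
  show (match List.idxOf? item (List.drop i toks) with
    | some k => (i : Int) + (k : Int) | none => -1) = _
  cases h : List.idxOf? item (toks.drop i) <;> simp

-- the context every hit provides
lemma pvHitCtx {toks : List String} {i : Nat} (hEF : pvEF (toks.drop i))
    (hfun : PySem.List.pyGetD toks (↑i) "" = "function")
    (hnp : PySem.List.pyGetD toks ((↑i) + 1) "" ≠ "(") :
    ∃ seg tail, i < toks.length ∧ toks.drop i = "function" :: (seg ++ "(" :: tail) ∧
      seg ≠ [] ∧ "(" ∉ seg ∧ "function" ∉ seg ∧ (":" ∈ seg → tail ≠ []) ∧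
      PySem.List.index? (toks.drop (i + 1)) "(" = some seg.length ∧
      toks.drop (i + 1) = seg ++ "(" :: tail := by
  rw [PySem.List.pyGetD_natCast] at hfun
  have hi : i < toks.length := by
    by_contra hge
    rw [List.getD_eq_getElem?_getD, List.getElem?_eq_none (by omega)] at hfun
    simp at hfun
  have hdrop : toks.drop i = toks[i] :: toks.drop (i + 1) := List.drop_eq_getElem_cons hi
  have hfi : toks[i] = "function" := by
    rw [List.getD_eq_getElem?_getD, List.getElem?_eq_getElem hi] at hfun
    simpa using hfun
  have hok : pvHeadOK (toks.drop (i + 1)) := by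
    apply hEF
    rw [hdrop, hfi]
  have hne : (toks.drop (i + 1)).getD 0 "" ≠ "(" := by
    intro hh
    apply hnp
    have : ((i : Int) + 1) = ((i + 1 : Nat) : Int) := by push_cast; ring
    rw [this, PySem.List.pyGetD_natCast]
    rw [List.getD_eq_getElem?_getD, List.getElem?_drop] at hh
    rw [List.getD_eq_getElem?_getD]
    simpa using hh
  obtain ⟨seg, tail, hu, hs, h1, h2, hcol, hidx⟩ := pvHit_decomp hok hne
  exact ⟨seg, tail, hi, by rw [hdrop, hfi, hu], hs, h1, h2, hcol, hidx, hu⟩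

-- ---- bridging Python indexing to list facts ----

lemma pvGet_eq {toks : List String} {i : Nat} (hi : i < toks.length) :
    PySem.List.pyGetD toks (↑i) "" = toks[i] := by
  rw [PySem.List.pyGetD_natCast, List.getD_eq_getElem?_getD, List.getElem?_eq_getElem hi]
  rfl

lemma pvGetNext_eq (toks : List String) (i : Nat) :
    PySem.List.pyGetD toks ((↑i) + 1) "" = (toks.drop (i+1)).getD 0 "" := by
  have : ((i : Int) + 1) = ((i + 1 : Nat) : Int) := by push_cast; ring
  rw [this, PySem.List.pyGetD_natCast, List.getD_eq_getElem?_getD, List.getD_eq_getElem?_getD,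
    List.getElem?_drop]

lemma pvEF_drop_succ {toks : List String} {i : Nat} (h : pvEF (toks.drop i)) :
    pvEF (toks.drop (i+1)) := by
  apply pvEF_suffix _ h
  have : toks.drop (i+1) = (toks.drop i).drop 1 := by rw [List.drop_drop]
  rw [this]
  exact List.drop_suffix 1 _

lemma pvSpec_copy {toks : List String} {i : Nat} (hi : i < toks.length)
    (hnc : ¬(toks[i] = "function" ∧ (toks.drop (i+1)).getD 0 "" ≠ "(" ∧ "(" ∈ toks.drop (i+1))) :
    pvSpec (toks.drop i) = toks[i] :: pvSpec (toks.drop (i+1)) := by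
  rw [List.drop_eq_getElem_cons hi, pvSpec]
  rw [if_neg hnc]

lemma pvFixColon_eq_set {seg : List String} {k : Nat}
    (h : PySem.List.index? seg ":" = some k) : pvFixColon seg = seg.set k "." := by
  unfold pvFixColon; rw [h]

lemma pvFixColon_eq_self {seg : List String} (h : ":" ∉ seg) : pvFixColon seg = seg := by
  unfold pvFixColon
  rw [(PySem.List.index?_eq_none_iff seg ":").mpr h]

lemma pvTail_getD_eq {toks seg tail : List String} {i : Nat}
    (hdrop1 : toks.drop (i + 1) = seg ++ "(" :: tail) :
    PySem.List.pyGetD toks ((↑i) + 1 + (↑seg.length) + 1) "" = tail.getD 0 "" := by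
  have hc : ((i:Int) + 1 + (↑seg.length) + 1) = ((i + 1 + (seg.length + 1) : Nat) : Int) := by
    push_cast; ring
  rw [hc, PySem.List.pyGetD_natCast, List.getD_eq_getElem?_getD, List.getD_eq_getElem?_getD]
  rw [← List.getElem?_drop, hdrop1, List.getElem?_append_right (by simp)]
  simp

lemma pvDrop_tail {toks seg tail : List String} {i : Nat}
    (hdrop1 : toks.drop (i + 1) = seg ++ "(" :: tail) :
    toks.drop (i + 2 + seg.length) = tail := by
  have : toks.drop (i + 2 + seg.length) = (toks.drop (i+1)).drop (seg.length + 1) := by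
    rw [List.drop_drop]; congr 1; omega
  rw [this, hdrop1, List.drop_append]
  simp

-- ---- B's loop computes pvSpec ----

lemma pvAlt_eq : ∀ (g : Nat) (toks : List String) (i : Nat) (out : List String),
    toks.length ≤ i + g → pvEF (toks.drop i) →
    pvAltLoop toks toks.length g (↑i) out = out ++ pvSpec (toks.drop i) := by
  intro g
  induction g with
  | zero =>
    intro toks i out hlen _
    rw [List.drop_of_length_le (by omega), pvSpec_nil, List.append_nil]
    rfl
  | succ g ih =>
    intro toks i out hlen hEF
    by_cases hi : i < toks.length
    · simp only [pvAltLoop]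
      rw [if_pos (by exact_mod_cast hi)]
      by_cases hhit : (PySem.List.pyGetD toks (↑i) "" = "function" ∧ (↑i:Int) + 1 < (↑toks.length : Int) ∧ PySem.List.pyGetD toks ((↑i)+1) "" ≠ "(")
      · rw [if_pos hhit]
        obtain ⟨hfun, hlt, hnp⟩ := hhit
        obtain ⟨seg, tail, hi', hdropi, hs, h1, h2, hcol, hidx, hdrop1⟩ := pvHitCtx hEF hfun hnp
        have hcast1 : ((i:Int)+1).toNat = i + 1 := by omega
        rw [hcast1, hidx]
        dsimp only
        have hcast2 : ((i:Int) + 1) = ((i + 1 : Nat) : Int) := by push_cast; ring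
        have hhead : PySem.List.slice toks (some ((↑i)+1)) (some ((↑i)+1+(↑seg.length))) = seg := by
          have hcast3 : (((i + 1 : Nat) : Int) + (↑seg.length)) = ((i + 1 + seg.length : Nat) : Int) := by
            push_cast; ring
          rw [hcast2, hcast3, PySem.List.slice_natCast, hdrop1]
          have : i + 1 + seg.length - (i + 1) = seg.length := by omega
          rw [this, List.take_left]
        rw [hhead]
        have hrec : ∀ out', pvAltLoop toks toks.length g ((↑i) + 1 + (↑seg.length) + 1) out'
            = out' ++ pvSpec tail := by
          intro out'
          have hc : ((i:Int) + 1 + (↑seg.length) + 1) = ((i + 2 + seg.length : Nat) : Int) := by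
            push_cast; ring
          rw [hc, ih toks (i + 2 + seg.length) out' (by omega)
            (by rw [pvDrop_tail hdrop1]
                exact pvEF_suffix ⟨"function" :: (seg ++ ["("]), by rw [hdropi]; simp⟩ hEF),
            pvDrop_tail hdrop1]
        rw [hdropi] at *
        rw [pvSpec_hit hs h1 h2]
        by_cases hc : ":" ∈ seg
        · rw [if_pos hc]
          obtain ⟨kc, hkc⟩ := Option.isSome_iff_exists.mp
            ((PySem.List.index?_isSome_iff seg ":").mpr hc)
          rw [hkc]
          have hset : PySem.List.pySetD seg ((Option.getD (some kc) 0 : Nat) : Int) "." =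
              pvFixColon seg := by
            rw [pvFixColon_eq_set hkc]
            exact PySem.List.pySetD_natCast seg kc "."
          rw [hset, pvTail_getD_eq hdrop1, hrec]
          unfold pvExtras
          rw [if_pos hc]
          split_ifs <;> simp
        · rw [if_neg hc, hrec, pvFixColon_eq_self hc]
          unfold pvExtras
          rw [if_neg hc]
          simp
      · rw [if_neg hhit]
        have hcast2 : ((i:Int) + 1) = ((i + 1 : Nat) : Int) := by push_cast; ring
        have hnc : ¬(toks[i] = "function" ∧ (toks.drop (i+1)).getD 0 "" ≠ "(" ∧
            "(" ∈ toks.drop (i+1)) := by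
          rintro ⟨ha, hb, hcmem⟩
          apply hhit
          refine ⟨by rw [pvGet_eq hi, ha], ?_, by rw [pvGetNext_eq]; exact hb⟩
          have : toks.drop (i+1) ≠ [] := List.ne_nil_of_mem hcmem
          have : i + 1 < toks.length := by
            by_contra hge
            exact this (List.drop_of_length_le (by omega))
          exact_mod_cast (by omega : (i:Int) + 1 < (toks.length : Int))
        rw [pvGet_eq hi, hcast2,
          ih toks (i+1) (out ++ [toks[i]]) (by omega) (pvEF_drop_succ hEF),
          pvSpec_copy hi hnc]
        simp
    · simp only [pvAltLoop]
      rw [if_neg (by exact_mod_cast hi), List.drop_of_length_le (by omega), pvSpec_nil,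
        List.append_nil]

-- ---- A's scan-and-rewrite loop computes pvSpec ----

lemma pvGetD_at_prefix {P tail : List String} {m : Nat} (hP : P.length = m) :
    PySem.List.pyGetD (P ++ tail) (↑m) "" = tail.getD 0 "" := by
  subst hP
  rw [PySem.List.pyGetD_natCast, List.getD_eq_getElem?_getD, List.getD_eq_getElem?_getD,
    List.getElem?_append_right (le_refl _), Nat.sub_self]

lemma pvScan_eq : ∀ (f : Nat), ∀ (g : Nat) (toks : List String) (i : Nat),
    toks.length ≤ i + g → pvEF (toks.drop i) → pvCnt (toks.drop i) ≤ f →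
    pvRearrScan f g toks (↑i) = toks.take i ++ pvSpec (toks.drop i) := by
  intro f
  induction f using Nat.strong_induction_on with
  | _ f ihf =>
  intro g
  induction g with
  | zero =>
    intro toks i hlen _ _
    rw [List.drop_of_length_le (by omega), pvSpec_nil, List.append_nil,
      List.take_of_length_le (by omega)]
    cases f <;> simp only [pvRearrScan]
  | succ g ihg =>
    intro toks i hlen hEF hcnt
    by_cases hhit : (PySem.List.pyGetD toks (↑i) "" = "function" ∧ PySem.List.pyGetD toks ((↑i)+1) "" ≠ "(")
    · obtain ⟨hfun, hnp⟩ := hhit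
      obtain ⟨seg, tail, hi', hdropi, hs, h1, h2, hcol, hidx, hdrop1⟩ := pvHitCtx hEF hfun hnp
      rw [hdrop1] at hidx
      -- the prefix left untouched
      set pre := toks.take i with hpredef
      have hpre : pre.length = i := by
        rw [hpredef, List.length_take]; omega
      have htoks : pre ++ "function" :: (seg ++ "(" :: tail) = toks := by
        rw [hpredef, ← hdropi, List.take_append_drop]
      have hlentoks : toks.length = i + seg.length + tail.length + 2 := by
        rw [← htoks]; simp only [List.length_append, List.length_cons, hpre]; omega
      -- the '(' search
      have hp : pvIndexHelper toks "(" (↑i) = ((i + seg.length + 1 : Nat) : Int) := by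
        rw [pvIndexHelper_eq, hdropi, PySem.List.index?_cons_of_ne _ (by decide), hidx]
        show ((i + (seg.length + 1) : Nat) : Int) = _
        congr 1
      -- count bookkeeping: the hit consumes one rewritable occurrence
      have hcnthit : pvCnt (toks.drop i) = 1 + pvCnt tail := by
        rw [hdropi, pvCnt_hit hs h1 h2]
      obtain _ | f' := f
      · exact absurd hcnt (by omega)
      simp only [pvRearrScan]
      rw [if_pos ⟨hfun, hnp⟩]
      -- the list after all of A's mutations, uniformly in the meta test
      have key : ∀ (FX ext : List String), FX = pvFixColon seg → ext = pvExtras seg tail →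
          ∀ toks1, toks1 = pre ++ "function" :: (FX ++ "(" :: (ext ++ tail)) →
          ((PySem.List.pop? (PySem.List.insert (PySem.List.insert toks1
              (((i + seg.length + 1 : Nat) : Int)) "function") (((i + seg.length + 1 : Nat) : Int)) "=")
              (↑i)).map Prod.snd).getD (PySem.List.insert (PySem.List.insert toks1
              (((i + seg.length + 1 : Nat) : Int)) "function") (((i + seg.length + 1 : Nat) : Int)) "=") =
            pre ++ (FX ++ "=" :: "function" :: "(" :: (ext ++ tail)) := by
        intro FX ext hFX hext toks1 htoks1
        have hFXlen : FX.length = seg.length := by rw [hFX]; exact pvLength_fixColon seg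
        have hprefix : (pre ++ "function" :: FX).length = i + seg.length + 1 := by
          simp only [List.length_append, List.length_cons, hpre, hFXlen]; omega
        have htoks1' : toks1 = (pre ++ "function" :: FX) ++ "(" :: (ext ++ tail) := by
          rw [htoks1]; simp
        have hlen1 : i + seg.length + 1 ≤ toks1.length := by
          rw [htoks1']
          simp only [List.length_append, List.length_cons, hpre, hFXlen]
          omega
        have hins1 : PySem.List.insert toks1 ((i + seg.length + 1 : Nat) : Int) "function" =
            (pre ++ "function" :: FX) ++ "function" :: "(" :: (ext ++ tail) := by
          rw [PySem.List.insert_natCast _ _ _ hlen1, htoks1', List.take_left' hprefix,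
            List.drop_left' hprefix]
        rw [hins1]
        have hins2 : PySem.List.insert ((pre ++ "function" :: FX) ++
              "function" :: "(" :: (ext ++ tail)) ((i + seg.length + 1 : Nat) : Int) "=" =
            (pre ++ "function" :: FX) ++ "=" :: "function" :: "(" :: (ext ++ tail) := by
          rw [PySem.List.insert_natCast _ _ _
              (by simp only [List.length_append, List.length_cons, hpre, hFXlen]; omega),
            List.take_left' hprefix, List.drop_left' hprefix]
        rw [hins2]
        have hilt : i < ((pre ++ "function" :: FX) ++
            "=" :: "function" :: "(" :: (ext ++ tail)).length := by
          simp only [List.length_append, List.length_cons, hpre]; omega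
        rw [PySem.List.pop?_natCast _ _ hilt, Option.map_some, Option.getD_some]
        dsimp only
        have hshape : ((pre ++ "function" :: FX) ++ "=" :: "function" :: "(" :: (ext ++ tail)) =
            pre ++ "function" :: (FX ++ "=" :: "function" :: "(" :: (ext ++ tail)) := by simp
        rw [hshape, List.eraseIdx_append_of_length_le (by omega) _, hpre, Nat.sub_self,
          List.eraseIdx_cons_zero]
      -- finishing from the rewritten list, uniformly in the meta test
      have fin : ∀ (FX ext toks3 : List String), FX = pvFixColon seg → ext = pvExtras seg tail →
          toks3 = pre ++ (FX ++ "=" :: "function" :: "(" :: (ext ++ tail)) →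
          pvRearrScan f' (((toks3.length : Int) - (↑i)).toNat) toks3 (↑i) =
          pre ++ pvSpec (toks.drop i) := by
        intro FX ext toks3 hFX hext htoks3
        have hNoFunFX : "function" ∉ FX := hFX ▸ pvNoFun_fixColon h2
        have hNoFunExt : "function" ∉ ext := hext ▸ pvNoFun_extras seg tail
        · have hlen3 : i ≤ toks3.length := by
            rw [htoks3]; simp only [List.length_append, List.length_cons, hpre]; omega
          have hEF3 : pvEF (toks3.drop i) := by
            rw [htoks3, List.drop_left' hpre]
            have e1 : pvEF tail :=
              pvEF_suffix ⟨"function" :: (seg ++ ["("]), by rw [hdropi]; simp⟩ hEF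
            have e2 : pvEF ("function" :: "(" :: (ext ++ tail)) :=
              pvEF_fun_paren (pvEF_append_no_fun hNoFunExt e1)
            have e3 : pvEF ((FX ++ ["="]) ++ "function" :: "(" :: (ext ++ tail)) :=
              pvEF_append_no_fun (by
                intro hm
                rcases List.mem_append.mp hm with hma | hmb
                · exact hNoFunFX hma
                · simp at hmb) e2
            simpa using e3
          have hcnt3 : pvCnt (toks3.drop i) = pvCnt tail := by
            rw [htoks3, List.drop_left' hpre]
            have : FX ++ "=" :: "function" :: "(" :: (ext ++ tail) =
                (FX ++ ["="]) ++ "function" :: "(" :: (ext ++ tail) := by simp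
            rw [this, pvCnt_append_no_fun (by
                intro hm
                rcases List.mem_append.mp hm with hma | hmb
                · exact hNoFunFX hma
                · simp at hmb),
              pvCnt_fun_paren, pvCnt_append_no_fun hNoFunExt]
          rw [ihf f' (by omega) _ toks3 i (by omega) hEF3 (by omega)]
          rw [htoks3, List.take_left' hpre, List.drop_left' hpre]
          have hsp3 : pvSpec (FX ++ "=" :: "function" :: "(" :: (ext ++ tail)) =
              FX ++ "=" :: "function" :: "(" :: (ext ++ pvSpec tail) := by
            have : FX ++ "=" :: "function" :: "(" :: (ext ++ tail) =
                (FX ++ ["="]) ++ "function" :: "(" :: (ext ++ tail) := by simp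
            rw [this, pvSpec_append_no_fun (by
                intro hm
                rcases List.mem_append.mp hm with hma | hmb
                · exact hNoFunFX hma
                · simp at hmb),
              pvSpec_fun_paren, pvSpec_append_no_fun hNoFunExt]
            simp
          rw [hsp3, hdropi, pvSpec_hit hs h1 h2, hFX, hext]
          simp
      rw [hp]
      by_cases hc : ":" ∈ seg
      · -- meta-method: the ':' lies inside the head
        obtain ⟨kc, hkc⟩ := Option.isSome_iff_exists.mp
          ((PySem.List.index?_isSome_iff seg ":").mpr hc)
        obtain ⟨s1, s2, hseg12, hlen12, hnm1⟩ := (PySem.List.index?_eq_some_iff _ _ _).mp hkc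
        have hkclt : kc < seg.length := by
          rw [hseg12]; simp only [List.length_append, List.length_cons]; omega
        have hcv : pvIndexHelper toks ":" (↑i) = ((i + kc + 1 : Nat) : Int) := by
          rw [pvIndexHelper_eq, hdropi, PySem.List.index?_cons_of_ne _ (by decide),
            PySem.List.index?_append_of_mem _ hc, hkc, Option.map_some]
          show ((i + (kc + 1) : Nat) : Int) = _
          congr 1
        rw [hcv]
        rw [if_pos (show ((i:Nat):Int) < ((i + kc + 1 : Nat) : Int) ∧
            ((i + kc + 1 : Nat) : Int) < ((i + seg.length + 1 : Nat) : Int) from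
            ⟨by push_cast; omega, by push_cast; omega⟩)]
        -- tokens[c] = "."
        set FX := pvFixColon seg with hFXdef
        have hFXeq : FX = s1 ++ "." :: s2 := pvFixColon_decomp hseg12 (by rw [hlen12]; exact hkc)
        have hFXlen : FX.length = seg.length := pvLength_fixColon seg
        have ha : PySem.List.pySetD toks ((i + kc + 1 : Nat) : Int) "." =
            pre ++ "function" :: (FX ++ "(" :: tail) := by
          rw [PySem.List.pySetD_natCast]
          have htoks2 : toks = (pre ++ "function" :: s1) ++ ":" :: (s2 ++ "(" :: tail) := by
            rw [← htoks, hseg12]; simp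
          have hL1 : (pre ++ "function" :: s1).length = i + kc + 1 := by
            simp only [List.length_append, List.length_cons, hpre, hlen12]; omega
          rw [htoks2, List.set_append, if_neg (by omega)]
          rw [hL1, Nat.sub_self]
          show (pre ++ "function" :: s1) ++ "." :: (s2 ++ "(" :: tail) = _
          rw [hFXeq]; simp
        rw [ha]
        have hcast1 : ((i + seg.length + 1 : Nat) : Int) + 1 = ((i + seg.length + 2 : Nat) : Int) := by
          push_cast; ring
        have hcast2 : ((i + seg.length + 1 : Nat) : Int) + 2 = ((i + seg.length + 3 : Nat) : Int) := by
          push_cast; ring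
        rw [hcast1, hcast2]
        have hP2 : (pre ++ "function" :: FX ++ ["("]).length = i + seg.length + 2 := by
          simp only [List.length_append, List.length_cons, List.length_nil, hpre, hFXlen]
          omega
        have hb : PySem.List.insert (pre ++ "function" :: (FX ++ "(" :: tail))
            ((i + seg.length + 2 : Nat) : Int) "self" =
            pre ++ "function" :: (FX ++ "(" :: "self" :: tail) := by
          have hsh : pre ++ "function" :: (FX ++ "(" :: tail) =
              (pre ++ "function" :: FX ++ ["("]) ++ tail := by simp
          rw [hsh, PySem.List.insert_natCast _ _ _ (by simp only [List.length_append, hP2]; omega),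
            List.take_left' hP2, List.drop_left' hP2]
          simp
        rw [hb]
        have hgb : PySem.List.pyGetD (pre ++ "function" :: (FX ++ "(" :: "self" :: tail))
            ((i + seg.length + 3 : Nat) : Int) "" = tail.getD 0 "" := by
          have hsh : pre ++ "function" :: (FX ++ "(" :: "self" :: tail) =
              (pre ++ "function" :: FX ++ ["(", "self"]) ++ tail := by simp
          rw [hsh]
          exact pvGetD_at_prefix (by
            simp only [List.length_append, List.length_cons, hpre, hFXlen]; simp; omega)
        rw [hgb]
        have hextdef : ∀ z : Prop, pvExtras seg tail = "self" :: (if tail.getD 0 "" ≠ ")" then [","] else []) := by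
          intro _; unfold pvExtras; rw [if_pos hc]
        by_cases ht : tail.getD 0 "" ≠ ")"
        · rw [if_pos ht]
          have hcm : PySem.List.insert (pre ++ "function" :: (FX ++ "(" :: "self" :: tail))
              ((i + seg.length + 3 : Nat) : Int) "," =
              pre ++ "function" :: (FX ++ "(" :: (pvExtras seg tail ++ tail)) := by
            have hP3 : (pre ++ "function" :: FX ++ ["(", "self"]).length = i + seg.length + 3 := by
              simp only [List.length_append, List.length_cons, hpre, hFXlen]; simp; omega
            have hsh : pre ++ "function" :: (FX ++ "(" :: "self" :: tail) =
                (pre ++ "function" :: FX ++ ["(", "self"]) ++ tail := by simp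
            rw [hsh, PySem.List.insert_natCast _ _ _ (by simp only [List.length_append, hP3]; omega),
              List.take_left' hP3, List.drop_left' hP3, hextdef True, if_pos ht]
            simp
          rw [hcm, key FX (pvExtras seg tail) rfl rfl _ rfl]
          exact fin FX (pvExtras seg tail) _ rfl rfl rfl
        · rw [if_neg ht]
          have hforms : pre ++ "function" :: (FX ++ "(" :: "self" :: tail) =
              pre ++ "function" :: (FX ++ "(" :: (pvExtras seg tail ++ tail)) := by
            rw [hextdef True, if_neg ht]
            rfl
          rw [hforms, key FX (pvExtras seg tail) rfl rfl _ rfl]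
          exact fin FX (pvExtras seg tail) _ rfl rfl rfl
      · -- ordinary declaration: no ':' in the head
        have hkcn : PySem.List.index? seg ":" = none := (PySem.List.index?_eq_none_iff _ _).mpr hc
        have hFXeq : pvFixColon seg = seg := pvFixColon_eq_self hc
        have hexteq : pvExtras seg tail = [] := by unfold pvExtras; rw [if_neg hc]
        have hnocond : ∀ m, (pvIndexHelper toks ":" (↑i) = m) →
            (m = -1 ∨ ∃ mm : Nat, m = ((i + seg.length + mm + 2 : Nat) : Int)) →
            ((↑i : Int) < m ∧ m < ((i + seg.length + 1 : Nat) : Int)) → False := by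
          rintro m _ (rfl | ⟨mm, rfl⟩) ⟨hA, hB⟩
          · omega
          · push_cast at hB; omega
        have hcshape : pvIndexHelper toks ":" (↑i) = -1 ∨
            ∃ mm : Nat, pvIndexHelper toks ":" (↑i) = ((i + seg.length + mm + 2 : Nat) : Int) := by
          rw [pvIndexHelper_eq, hdropi, PySem.List.index?_cons_of_ne _ (by decide),
            pvIndex?_append_not_mem hc, PySem.List.index?_cons_of_ne _ (by decide)]
          cases hct : PySem.List.index? tail ":" with
          | none => left; rfl
          | some m =>
            right
            refine ⟨m, ?_⟩
            show ((i + (seg.length + (m + 1) + 1) : Nat) : Int) = _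
            congr 1
            omega
        rw [if_neg (fun hcond => hnocond _ rfl hcshape hcond)]
        have htshape : toks = pre ++ "function" :: (pvFixColon seg ++ "(" :: (pvExtras seg tail ++ tail)) := by
          rw [hFXeq, hexteq, ← htoks]; simp
        rw [key (pvFixColon seg) (pvExtras seg tail) rfl rfl toks htshape]
        exact fin (pvFixColon seg) (pvExtras seg tail) _ rfl rfl rfl
    · simp only [pvRearrScan]
      rw [if_neg hhit]
      by_cases hi : i < toks.length
      · have hstep : (↑i:Int) + 1 = ((i+1 : Nat) : Int) := by push_cast; ring
        have hnc : ¬(toks[i] = "function" ∧ (toks.drop (i+1)).getD 0 "" ≠ "(" ∧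
            "(" ∈ toks.drop (i+1)) := by
          rintro ⟨ha, hb, _⟩
          exact hhit ⟨by rw [pvGet_eq hi, ha], by rw [pvGetNext_eq]; exact hb⟩
        have hcnt' : pvCnt (toks.drop (i+1)) ≤ f := by
          have : pvCnt (toks.drop i) = (if toks[i] = "function" ∧ (toks.drop (i+1)).getD 0 "" ≠ "(" then 1 else 0) + pvCnt (toks.drop (i+1)) := by
            rw [List.drop_eq_getElem_cons hi, pvCnt]
          omega
        rw [hstep, ihg toks (i+1) (by omega) (pvEF_drop_succ hEF) hcnt']
        rw [pvSpec_copy hi hnc, List.take_add_one, List.getElem?_eq_getElem hi,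
          List.append_assoc]
        rfl
      · have hstep : (↑i:Int) + 1 = ((i+1 : Nat) : Int) := by push_cast; ring
        rw [hstep, ihg toks (i+1) (by omega)
          (by rw [List.drop_of_length_le (by omega)]; intro u hu; simp at hu)
          (by rw [List.drop_of_length_le (by omega)]; simp [pvCnt])]
        rw [List.drop_of_length_le (show toks.length ≤ i by omega),
          List.drop_of_length_le (show toks.length ≤ i + 1 by omega), pvSpec_nil,
          List.take_of_length_le (by omega), List.take_of_length_le (by omega)]

-- ===== VERDICT (by name: the statement is the Claim_ definition above) =====
theorem rearrange_functions_spec : Claim_equal_rearrange_functions := by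
  intro toks s _ hPre
  obtain ⟨hs, hforall⟩ := hPre
  unfold Spec_rearrange_functions rearrange_functions rearrange_functions_alt
  have hEF : pvEF (toks.drop s.toNat) := pvEF_of_forall hforall
  have hcnt : pvCnt (toks.drop s.toNat) ≤ toks.length := by
    have := pvCnt_le_length (toks.drop s.toNat)
    simp only [List.length_drop] at this
    omega
  have hcast : s = ((s.toNat : Nat) : Int) := (Int.toNat_of_nonneg hs).symm
  rw [hcast, pvScan_eq toks.length _ toks s.toNat (by omega) hEF hcnt,
    PySem.List.slice_to toks (by omega), Int.toNat_natCast,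
    pvAlt_eq _ toks s.toNat _ (by omega) hEF]
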